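-- pv_equiv track=rewrite | github.com/s172084/Python2022 | new_comprehension.py | display_dot_product
-- ===== SOURCE A (Python) =====
-- def display_dot_product(normal_list):
--     # Show me the money
--
--     def __divide_chunks(normal_list):
--         ''''Take a normal list and convert to n equal sublists. The output is a list of lists of strings.'''
--         # How many columns should matrix each have?
--         n = 4
--
--         # Convert integers to strings.
--         K = list(map(str, normal_list))
--
--         for i in range(0, len(K), n):
--             yield K[i:i + n]
--
--
--     def __display_matrix(K):
--         '''Concatenate a list of list (matrix) to a string with the appropriate matrix lookie-likie format.'''
--         '''The input is a list of list of strings. The output is a single formatted string.'''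
--
--         MX = ""
--
--         for i in K:
--             MX += "{}".format("\t".join(i))
--             # Add newlines \n or spaces " "
--             MX += "\n"
--
--         return(MX)
--
--     #--------------------------------------------------------------------"
--     # call the internal functions
--     numbers_in_rows = list(__divide_chunks(normal_list))
--     the_dot_product = __display_matrix(numbers_in_rows)
--     return(the_dot_product)
-- ===== SOURCE B (Python) =====
-- def display_dot_product(normal_list):
--     # Single flat pass: element then '\t', or '\n' at each 4th column and at the end.
--     strs = [str(x) for x in normal_list]
--     n = len(strs)
--     out = ""
--     for i, s in enumerate(strs):
--         out += s
--         out += "\n" if (i + 1) % 4 == 0 or i == n - 1 else "\t"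
--     return out
-- ===== Notes on version B (the rewrite author's own statement) =====
-- stated objective: simpler
-- what changed: Replaces the two inner helpers (a chunk generator materializing a list of 4-element sublists, then a join-per-row loop) with one flat pass over the stringified elements that appends each element followed by the right separator computed from its index.
import Mathlib
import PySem

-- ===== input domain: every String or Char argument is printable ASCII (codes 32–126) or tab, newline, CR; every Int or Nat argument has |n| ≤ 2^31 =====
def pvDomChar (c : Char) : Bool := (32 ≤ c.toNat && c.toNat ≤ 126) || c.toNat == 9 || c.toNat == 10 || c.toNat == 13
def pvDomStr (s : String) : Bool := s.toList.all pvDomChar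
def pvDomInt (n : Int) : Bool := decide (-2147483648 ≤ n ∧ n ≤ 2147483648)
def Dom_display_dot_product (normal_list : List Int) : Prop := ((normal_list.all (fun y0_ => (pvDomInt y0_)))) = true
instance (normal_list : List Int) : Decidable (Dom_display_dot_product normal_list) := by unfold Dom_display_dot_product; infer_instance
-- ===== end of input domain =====

-- B replaces A's chunk-generator + row-join helpers by one flat indexed pass choosing each separator; same output, simpler decomposition.


-- ===== PORT A =====
def display_dot_product (normal_list : List Int) : String :=
  -- K = list(map(str, normal_list)); chunks yielded by range(0, len(K), 4) and K[i:i+4]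
  let K : List String := normal_list.map PySem.Int.toStr
  let numbers_in_rows : List (List String) :=
    (PySem.List.pyRange 0 (K.length : Int) 4).map
      (fun i => PySem.List.slice K (some i) (some (i + 4)))
  -- __display_matrix: MX += "\t".join(i); MX += "\n"
  numbers_in_rows.foldl (fun MX i => (MX ++ PySem.Str.join "\t" i) ++ "\n") ""

-- ===== PORT B =====
def display_dot_product_alt (normal_list : List Int) : String :=
  let strs : List String := normal_list.map PySem.Int.toStr
  let n : Int := (strs.length : Int)
  (PySem.List.enumerate strs 0).foldl
    (fun out p =>
      (out ++ p.2) ++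
        (if PySem.Int.mod (p.1 + 1) 4 == 0 || p.1 == n - 1 then "\n" else "\t"))
    ""

-- ===== PRECONDITION & SPEC =====
def Spec_display_dot_product (normal_list : List Int) (out : String) : Prop := out = display_dot_product_alt normal_list
instance (normal_list : List Int) (out : String) : Decidable (Spec_display_dot_product normal_list out) := by unfold Spec_display_dot_product; infer_instance

-- ===== CLAIM (what is proved, stated in full; the proofs are below) =====
def Claim_equal_display_dot_product : Prop := ∀ (normal_list : List Int), Dom_display_dot_product normal_list → Spec_display_dot_product normal_list (display_dot_product normal_list)

-- ===== LEMMAS AND PROOFS =====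

/-- The common shape: rows of four, each joined with tabs and ended with a newline. -/
def rowsS : List String → String
  | [] => ""
  | a :: rest => PySem.Str.join "\t" (a :: rest.take 3) ++ ("\n" ++ rowsS (rest.drop 3))
termination_by K => K.length
decreasing_by simp

/-- A's chunking, recursively. -/
def chunkList : List String → List (List String)
  | [] => []
  | a :: rest => (a :: rest.take 3) :: chunkList (rest.drop 3)
termination_by K => K.length
decreasing_by simp

lemma chunk_map (K : List String) :
    (List.range ((K.length + 3) / 4)).map (fun k => (K.drop (4 * k)).take 4) = chunkList K := by
  fun_induction chunkList K with
  | case1 => simp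
  | case2 a rest ih =>
    simp only [List.length_drop] at ih
    have hm : ((a :: rest).length + 3) / 4 = (rest.length - 3 + 3) / 4 + 1 := by
      simp; omega
    rw [hm, List.range_succ_eq_map, List.map_cons, List.map_map]
    congr 1
    rw [← ih]
    apply List.map_congr_left
    intro k _
    simp only [Function.comp]
    have h1 : 4 * Nat.succ k = (4 * k + 3) + 1 := by omega
    rw [h1, List.drop_succ_cons, ← List.drop_drop]
    rw [List.drop_drop, List.drop_drop]
    congr 2
    omega

lemma chunks_eq (K : List String) :
    (PySem.List.pyRange 0 (K.length : Int) 4).map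
      (fun i => PySem.List.slice K (some i) (some (i + 4))) = chunkList K := by
  rw [PySem.List.pyRange_of_pos _ _ (by norm_num), List.map_map]
  have hm : (if (0:Int) < (K.length : Int) then (((K.length : Int) - 0 + 4 - 1) / 4).toNat else 0)
      = (K.length + 3) / 4 := by
    split_ifs with h
    · omega
    · omega
  rw [hm, ← chunk_map K]
  apply List.map_congr_left
  intro k _
  simp only [Function.comp, zero_add]
  have h1 : (4 : Int) * (k : Int) = ((4 * k : Nat) : Int) := by push_cast; ring
  rw [h1]
  rw [show ((4 * k : Nat) : Int) + 4 = ((4 * k : Nat) : Int) + ((4 : Nat) : Int) by norm_num]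
  rw [PySem.List.slice_natCast_add]

lemma foldA (K : List String) (acc : String) :
    (chunkList K).foldl (fun MX i => (MX ++ PySem.Str.join "\t" i) ++ "\n") acc
      = acc ++ rowsS K := by
  fun_induction chunkList K generalizing acc with
  | case1 => simp [rowsS]
  | case2 a rest ih =>
    simp only [List.foldl_cons, ih, rowsS]
    apply String.ext
    simp

lemma foldB (K : List String) (i0 : Nat) (n : Int) (acc : String)
    (h4 : i0 % 4 = 0) (hn : n = (i0 : Int) + K.length) :
    (PySem.List.enumerate K (i0 : Int)).foldl
      (fun out p => (out ++ p.2) ++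
        (if PySem.Int.mod (p.1 + 1) 4 == 0 || p.1 == n - 1 then "\n" else "\t")) acc
      = acc ++ rowsS K := by
  fun_induction rowsS K generalizing i0 acc with
  | case1 => simp [PySem.List.enumerate_nil]
  | case2 a rest ih =>
    rcases rest with _ | ⟨b, rest⟩
    · -- K = [a]: last element, newline
      simp only [PySem.List.enumerate_cons, PySem.List.enumerate_nil,
        List.foldl_cons, List.foldl_nil]
      rw [if_pos (by simp [PySem.Int.mod, Int.fmod_eq_emod] at hn ⊢; omega)]
      apply String.ext
      simp [PySem.Str.join, PySem.Chars.join, List.intercalate, rowsS]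
    rcases rest with _ | ⟨c, rest⟩
    · -- K = [a, b]
      simp only [PySem.List.enumerate_cons, PySem.List.enumerate_nil,
        List.foldl_cons, List.foldl_nil]
      rw [if_neg (by simp [PySem.Int.mod, Int.fmod_eq_emod] at hn ⊢; omega)]
      rw [if_pos (by simp [PySem.Int.mod, Int.fmod_eq_emod] at hn ⊢; omega)]
      apply String.ext
      simp [PySem.Str.join, PySem.Chars.join, List.intercalate, List.intersperse, rowsS]
    rcases rest with _ | ⟨d, rest⟩
    · -- K = [a, b, c]
      simp only [PySem.List.enumerate_cons, PySem.List.enumerate_nil,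
        List.foldl_cons, List.foldl_nil]
      rw [if_neg (by simp [PySem.Int.mod, Int.fmod_eq_emod] at hn ⊢; omega)]
      rw [if_neg (by simp [PySem.Int.mod, Int.fmod_eq_emod] at hn ⊢; omega)]
      rw [if_pos (by simp [PySem.Int.mod, Int.fmod_eq_emod] at hn ⊢; omega)]
      apply String.ext
      simp [PySem.Str.join, PySem.Chars.join, List.intercalate, List.intersperse, rowsS]
    · -- K = a :: b :: c :: d :: rest: a full row, then recurse
      simp only [PySem.List.enumerate_cons, List.foldl_cons]
      rw [if_neg (by simp [PySem.Int.mod, Int.fmod_eq_emod] at hn ⊢; omega)]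
      rw [if_neg (by simp [PySem.Int.mod, Int.fmod_eq_emod] at hn ⊢; omega)]
      rw [if_neg (by simp [PySem.Int.mod, Int.fmod_eq_emod] at hn ⊢; omega)]
      rw [if_pos (by simp [PySem.Int.mod, Int.fmod_eq_emod]; omega)]
      have hstart : (i0 : Int) + 1 + 1 + 1 + 1 = ((i0 + 4 : Nat) : Int) := by push_cast; ring
      simp only [List.drop_succ_cons, List.drop_zero] at ih
      rw [hstart, ih (i0 + 4) _ (by omega) (by simp at hn ⊢; omega)]
      apply String.ext
      simp [PySem.Str.join, PySem.Chars.join, List.intercalate, List.intersperse]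

-- ===== VERDICT (by name: the statement is the Claim_ definition above) =====
theorem display_dot_product_spec : Claim_equal_display_dot_product := by
  intro l _
  unfold Spec_display_dot_product display_dot_product display_dot_product_alt
  simp only []
  rw [chunks_eq, foldA]
  have hB := foldB (l.map PySem.Int.toStr) 0 ((l.map PySem.Int.toStr).length : Int) ""
    (by omega) (by simp)
  simp only [Nat.cast_zero] at hB
  rw [hB]
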